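-- pv_equiv track=rewrite | github.com/krzysiekbienias/JobHunting | src/CodeSignal/company_chalenge/asana.py | taskTypes
-- ===== SOURCE A (Python) =====
-- def taskTypes(deadlines,day):
--     diffs=[deadline -day for deadline in deadlines ]
--     today=0
--     upcoming=0
--     later=0
--     for d in diffs:
--         if d<=0:
--             today+=1
--         elif d>=1 and d<=7:
--             upcoming+=1
--         else:
--             later +=1
--     return [today,upcoming,later]
-- ===== SOURCE B (Python) =====
-- def taskTypes(deadlines, day):
--     today = sum(1 for dl in deadlines if dl - day <= 0)
--     upcoming = sum(1 for dl in deadlines if 1 <= dl - day <= 7)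
--     return [today, upcoming, len(deadlines) - today - upcoming]
-- ===== Notes on version B (the rewrite author's own statement) =====
-- stated objective: idiomatic
-- what changed: Replaces the intermediate diffs list and the single three-way accumulator loop by two independent predicate counts (sum of generator expressions), obtaining the third bucket by complementary subtraction from len(deadlines).
import Mathlib
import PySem

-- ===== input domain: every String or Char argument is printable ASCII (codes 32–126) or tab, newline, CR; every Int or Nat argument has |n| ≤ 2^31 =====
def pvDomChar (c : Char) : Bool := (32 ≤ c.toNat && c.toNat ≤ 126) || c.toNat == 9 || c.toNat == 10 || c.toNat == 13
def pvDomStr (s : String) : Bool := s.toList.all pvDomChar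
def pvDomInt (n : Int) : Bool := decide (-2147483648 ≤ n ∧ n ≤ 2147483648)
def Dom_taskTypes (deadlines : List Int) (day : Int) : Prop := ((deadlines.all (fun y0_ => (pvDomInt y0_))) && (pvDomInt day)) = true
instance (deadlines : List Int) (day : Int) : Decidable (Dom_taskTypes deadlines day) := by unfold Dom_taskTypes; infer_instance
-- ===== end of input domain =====

-- B (idiomatic): replaces A's diffs list + three-way accumulator loop by two independent
-- predicate counts, with the third bucket obtained by subtraction from the length; same cost.

-- ===== PORT A =====
-- literal port of A: build the diffs list, then fold the three counters over it
def taskTypesLoop : List Int → Int → Int → Int → Int × Int × Int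
  | [], today, upcoming, later => (today, upcoming, later)
  | d :: ds, today, upcoming, later =>
      if d ≤ 0 then taskTypesLoop ds (today + 1) upcoming later
      else if 1 ≤ d ∧ d ≤ 7 then taskTypesLoop ds today (upcoming + 1) later
      else taskTypesLoop ds today upcoming (later + 1)

def taskTypes (deadlines : List Int) (day : Int) : List Int :=
  let diffs := deadlines.map (fun deadline => deadline - day)
  let r := taskTypesLoop diffs 0 0 0
  [r.1, r.2.1, r.2.2]

-- ===== PORT B =====
-- port of B: two independent counts, third bucket by subtraction from the length
def taskTypes_alt (deadlines : List Int) (day : Int) : List Int :=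
  let today : Int := deadlines.countP (fun dl => dl - day ≤ 0)
  let upcoming : Int := deadlines.countP (fun dl => 1 ≤ dl - day ∧ dl - day ≤ 7)
  [today, upcoming, (deadlines.length : Int) - today - upcoming]

-- ===== PRECONDITION & SPEC =====
def Spec_taskTypes (deadlines : List Int) (day : Int) (out : List Int) : Prop := out = taskTypes_alt deadlines day
instance (deadlines : List Int) (day : Int) (out : List Int) : Decidable (Spec_taskTypes deadlines day out) := by unfold Spec_taskTypes; infer_instance

-- ===== CLAIM (what is proved, stated in full; the proofs are below) =====
def Claim_equal_taskTypes : Prop := ∀ (deadlines : List Int) (day : Int), Dom_taskTypes deadlines day → Spec_taskTypes deadlines day (taskTypes deadlines day)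

-- ===== LEMMAS AND PROOFS =====

-- ===== VERDICT (by name: the statement is the Claim_ definition above) =====
theorem taskTypesLoop_eq (diffs : List Int) (t u l : Int) :
    taskTypesLoop diffs t u l =
      (t + (diffs.countP (fun d => d ≤ 0) : Int),
       u + (diffs.countP (fun d => 1 ≤ d ∧ d ≤ 7) : Int),
       l + (diffs.length : Int) - (diffs.countP (fun d => d ≤ 0) : Int)
         - (diffs.countP (fun d => 1 ≤ d ∧ d ≤ 7) : Int)) := by
  induction diffs generalizing t u l with
  | nil => simp [taskTypesLoop]
  | cons d ds ih =>
    have hlen : ((d :: ds).length : Int) = (ds.length : Int) + 1 := by simp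
    by_cases h1 : d ≤ 0
    · have hc1 : (d :: ds).countP (fun d => d ≤ 0) = ds.countP (fun d => d ≤ 0) + 1 := by
        simp [List.countP_cons, h1]
      have hc2 : (d :: ds).countP (fun d => 1 ≤ d ∧ d ≤ 7)
          = ds.countP (fun d => 1 ≤ d ∧ d ≤ 7) := by
        simp [List.countP_cons]; omega
      rw [show taskTypesLoop (d :: ds) t u l = taskTypesLoop ds (t + 1) u l from by
        simp [taskTypesLoop, h1], ih, hc1, hc2, hlen]
      refine Prod.ext ?_ (Prod.ext ?_ ?_) <;> simp <;> push_cast <;> ring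
    · by_cases h2 : 1 ≤ d ∧ d ≤ 7
      · have hc1 : (d :: ds).countP (fun d => d ≤ 0) = ds.countP (fun d => d ≤ 0) := by
          simp [List.countP_cons, h1]
        have hc2 : (d :: ds).countP (fun d => 1 ≤ d ∧ d ≤ 7)
            = ds.countP (fun d => 1 ≤ d ∧ d ≤ 7) + 1 := by
          simp [List.countP_cons, h2]
        rw [show taskTypesLoop (d :: ds) t u l = taskTypesLoop ds t (u + 1) l from by
          simp [taskTypesLoop, h1, h2], ih, hc1, hc2, hlen]
        refine Prod.ext ?_ (Prod.ext ?_ ?_) <;> simp <;> push_cast <;> ring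
      · have hc1 : (d :: ds).countP (fun d => d ≤ 0) = ds.countP (fun d => d ≤ 0) := by
          simp [List.countP_cons, h1]
        have hc2 : (d :: ds).countP (fun d => 1 ≤ d ∧ d ≤ 7)
            = ds.countP (fun d => 1 ≤ d ∧ d ≤ 7) := by
          simp [List.countP_cons]; omega
        rw [show taskTypesLoop (d :: ds) t u l = taskTypesLoop ds t u (l + 1) from by
          simp [taskTypesLoop, h1, h2], ih, hc1, hc2, hlen]
        refine Prod.ext ?_ (Prod.ext ?_ ?_) <;> simp <;> push_cast <;> ring

theorem taskTypes_spec : Claim_equal_taskTypes := by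
  intro deadlines day _
  unfold Spec_taskTypes taskTypes taskTypes_alt
  simp only []
  rw [taskTypesLoop_eq]
  simp [List.countP_map, Function.comp_def]
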